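-- pv_equiv track=rewrite | github.com/RamanujanMachine/RamanujanMachine | source/series_generators.py | create_series_from_compact_poly_with_shift2n1
-- ===== SOURCE A (Python) =====
-- def create_series_from_compact_poly_with_shift2n1(poly_a, n):
--     """
--     create a series of type m(m(...(a[1]*m + a[0]) + a[2]) + ...) + a[k],
--     where m=2n+1
--     :param poly_a: a[k] coefficients
--     :param n: length of series
--     :return: a list of numbers in series
--     """
--     ret = []
--     for m in range(1, 2 * n + 1, 2):
--         tmp = 0
--         for c in poly_a:
--             tmp *= m
--             tmp += c
--         ret.append(tmp)
--     return ret
-- ===== SOURCE B (Python) =====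
-- def _eval_powsum(poly_a, m):
--     # sum of coefficient * m**exponent, low exponent first, with a running power
--     total = 0
--     p = 1
--     for c in reversed(poly_a):
--         total += c * p
--         p *= m
--     return total
--
--
-- def create_series_from_compact_poly_with_shift2n1(poly_a, n):
--     return [_eval_powsum(poly_a, 2 * i + 1) for i in range(n)]
-- ===== Notes on version B (the rewrite author's own statement) =====
-- stated objective: alternative
-- what changed: B evaluates each point as a low-to-high power sum (running power of m, summing c*p over the reversed coefficients) at m = 2*i+1 generated from range(n), replacing A's high-to-low Horner accumulator over range(1, 2n+1, 2).
import Mathlib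
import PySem

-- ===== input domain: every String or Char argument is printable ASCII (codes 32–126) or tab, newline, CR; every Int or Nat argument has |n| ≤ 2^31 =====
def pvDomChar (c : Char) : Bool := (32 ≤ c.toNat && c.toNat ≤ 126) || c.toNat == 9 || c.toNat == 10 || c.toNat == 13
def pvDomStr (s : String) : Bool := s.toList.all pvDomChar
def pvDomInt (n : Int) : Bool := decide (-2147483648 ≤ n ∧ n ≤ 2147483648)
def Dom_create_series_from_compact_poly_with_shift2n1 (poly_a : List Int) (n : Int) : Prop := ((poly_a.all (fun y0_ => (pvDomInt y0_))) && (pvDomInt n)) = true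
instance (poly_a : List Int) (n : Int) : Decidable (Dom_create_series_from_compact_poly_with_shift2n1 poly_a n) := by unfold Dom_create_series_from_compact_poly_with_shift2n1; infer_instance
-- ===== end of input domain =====

-- ===== PORT A =====
-- Header: B evaluates each point as an explicit power sum over the reversed coefficients
-- (m = 2*i+1 from range(n)) instead of A's Horner accumulator over range(1, 2n+1, 2); alternative decomposition, not claimed faster.
def create_series_from_compact_poly_with_shift2n1 (poly_a : List Int) (n : Int) : List Int :=
  (PySem.List.pyRange 1 (2 * n + 1) 2).foldl
    (fun ret m => ret ++ [poly_a.foldl (fun tmp c => tmp * m + c) 0]) []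

-- ===== PORT B =====
-- Source B helper _eval_powsum: low-to-high power sum with a running power p, over reversed(poly_a)
def pv_eval_powsum (poly_a : List Int) (m : Int) : Int :=
  (poly_a.reverse.foldl (fun s c => (s.1 + c * s.2, s.2 * m)) ((0 : Int), (1 : Int))).1

def create_series_from_compact_poly_with_shift2n1_alt (poly_a : List Int) (n : Int) : List Int :=
  (PySem.List.pyRange 0 n 1).map (fun i => pv_eval_powsum poly_a (2 * i + 1))

-- ===== PRECONDITION & SPEC =====
def Spec_create_series_from_compact_poly_with_shift2n1 (poly_a : List Int) (n : Int) (out : List Int) : Prop := out = create_series_from_compact_poly_with_shift2n1_alt poly_a n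
instance (poly_a : List Int) (n : Int) (out : List Int) : Decidable (Spec_create_series_from_compact_poly_with_shift2n1 poly_a n out) := by unfold Spec_create_series_from_compact_poly_with_shift2n1; infer_instance

-- ===== CLAIM (what is proved, stated in full; the proofs are below) =====
def Claim_equal_create_series_from_compact_poly_with_shift2n1 : Prop := ∀ (poly_a : List Int) (n : Int), Dom_create_series_from_compact_poly_with_shift2n1 poly_a n → Spec_create_series_from_compact_poly_with_shift2n1 poly_a n (create_series_from_compact_poly_with_shift2n1 poly_a n)

-- ===== LEMMAS AND PROOFS =====

-- the running-power sum over l equals Horner's fold over l.reverse (so over poly_a itself,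
-- since B folds over poly_a.reverse)
theorem pv_powsum_fold (l : List Int) (m t p : Int) :
    (l.foldl (fun s c => (s.1 + c * s.2, s.2 * m)) (t, p)).1
      = t + p * (l.reverse.foldl (fun tmp c => tmp * m + c) 0) := by
  induction l generalizing t p with
  | nil => simp
  | cons c l ih =>
      simp only [List.foldl_cons, ih, List.reverse_cons, List.foldl_append, List.foldl_cons,
        List.foldl_nil]
      ring

-- the two evaluation grids coincide: range(1, 2n+1, 2) = [2*i+1 for i in range(n)]
theorem pv_grid (n : Int) :
    PySem.List.pyRange 1 (2 * n + 1) 2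
      = (PySem.List.pyRange 0 n 1).map (fun i => 2 * i + 1) := by
  rw [PySem.List.pyRange_of_pos 1 (2 * n + 1) (by norm_num), PySem.List.pyRange_one]
  by_cases h : n ≤ 0
  · have h1 : ¬ (1 : Int) < 2 * n + 1 := by omega
    simp [h1, Int.toNat_of_nonpos h]
  · have h1 : (1 : Int) < 2 * n + 1 := by omega
    have h2 : (2 * n + 1 - 1 + 2 - 1) / 2 = n := by omega
    simp only [h1, if_true, h2, sub_zero, List.map_map]
    exact List.map_congr_left (fun k _ => by simp; ring)

-- ===== VERDICT (by name: the statement is the Claim_ definition above) =====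
theorem create_series_from_compact_poly_with_shift2n1_spec : Claim_equal_create_series_from_compact_poly_with_shift2n1 := by
  intro poly_a n _
  unfold Spec_create_series_from_compact_poly_with_shift2n1
  unfold create_series_from_compact_poly_with_shift2n1 create_series_from_compact_poly_with_shift2n1_alt
  rw [PySem.List.foldl_append_singleton_eq_map, List.nil_append, pv_grid, List.map_map]
  exact List.map_congr_left (fun i _ => by
    rw [Function.comp_apply, pv_eval_powsum, pv_powsum_fold]
    simp)
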